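-- pv_equiv track=rewrite | github.com/pypi-data/pypi-mirror-283 | packages/data-harvesting/data_harvesting-2.0.0-py3-none-any.whl/data_harvesting/schemas/mappings/map_repo.py | check_unmapped_keys
-- ===== SOURCE A (Python) =====
-- from typing import Dict
-- from typing import List
--
-- def check_unmapped_keys(mapping: Dict[str, str], full_keys: List[str]) -> List[str]:
--     """Small helper function to check if a key is within a mapping string
--
--     :param mapping: The jq mapping as a dict, where each value is a jq mapping string
--     :type mapping: Dict[str, str]
--     :param full_keys: Keys which may be present
--     :type full_keys: List[str]
--     :return: A list of unused keys
--     :rtype: List[str]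
--     """
--     unused_keys = []
--     for key in full_keys:
--         found = False
--         for val in mapping.values():
--             if key in val:
--                 found = True
--                 continue
--         if not found:
--             unused_keys.append(key)
--     return unused_keys
-- ===== SOURCE B (Python) =====
-- def check_unmapped_keys(mapping, full_keys):
--     """Value-major scan: keep a shrinking set of not-yet-found keys, stop early
--     when every key has been found, then emit unfound keys in original order."""
--     remaining = set(full_keys)
--     for val in mapping.values():
--         if not remaining:
--             break
--         remaining = {k for k in remaining if k not in val}
--     return [k for k in full_keys if k in remaining]
-- ===== Notes on version B (the rewrite author's own statement) =====
-- stated objective: alternative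
-- what changed: Inverted the loop nesting: B scans the mapping values once, maintaining a shrinking set of not-yet-found keys with an early exit when it empties, instead of A's per-key flag scan over all values; output is rebuilt by filtering the original key list.
import Mathlib
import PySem

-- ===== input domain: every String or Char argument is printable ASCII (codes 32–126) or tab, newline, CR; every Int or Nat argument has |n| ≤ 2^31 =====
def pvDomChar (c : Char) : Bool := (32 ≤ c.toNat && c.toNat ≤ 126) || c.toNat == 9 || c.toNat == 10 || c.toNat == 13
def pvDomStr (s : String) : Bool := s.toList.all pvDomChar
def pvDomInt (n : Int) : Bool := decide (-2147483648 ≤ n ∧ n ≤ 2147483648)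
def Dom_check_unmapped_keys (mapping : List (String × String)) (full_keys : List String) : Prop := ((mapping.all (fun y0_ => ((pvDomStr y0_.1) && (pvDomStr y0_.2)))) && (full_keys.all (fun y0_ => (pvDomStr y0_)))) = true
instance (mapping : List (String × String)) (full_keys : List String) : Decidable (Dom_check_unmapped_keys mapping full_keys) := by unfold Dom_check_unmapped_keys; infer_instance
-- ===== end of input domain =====

-- B inverts the loop nesting (one value-major scan over mapping.values with a shrinking
-- set of not-yet-found keys and an early exit), instead of A's per-key flag scan; same cost class.


-- ===== PORT A =====
def check_unmapped_keys (mapping : List (String × String)) (full_keys : List String) : List String :=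
  let vals := (PySem.Dict.ofList mapping).values
  full_keys.foldl (fun unused_keys key =>
    let found := vals.foldl (fun found v => if PySem.Str.isIn key v then true else found) false
    if !found then unused_keys ++ [key] else unused_keys) []

-- ===== PORT B =====
-- the 'for val in mapping.values(): if not remaining: break; remaining = {k for k in remaining if k not in val}' loop
def pvAltLoop (vals : List String) (remaining : PySem.Set String) : PySem.Set String :=
  match vals with
  | [] => remaining
  | v :: rest =>
    if remaining.isEmpty then remaining
    else pvAltLoop rest (PySem.Set.ofList (remaining.filter (fun k => !(PySem.Str.isIn k v))))

def check_unmapped_keys_alt (mapping : List (String × String)) (full_keys : List String) : List String :=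
  let remaining := pvAltLoop ((PySem.Dict.ofList mapping).values) (PySem.Set.ofList full_keys)
  full_keys.filter (fun k => PySem.Set.contains remaining k)

-- ===== PRECONDITION & SPEC =====
def Spec_check_unmapped_keys (mapping : List (String × String)) (full_keys : List String) (out : List String) : Prop := out = check_unmapped_keys_alt mapping full_keys
instance (mapping : List (String × String)) (full_keys : List String) (out : List String) : Decidable (Spec_check_unmapped_keys mapping full_keys out) := by unfold Spec_check_unmapped_keys; infer_instance

-- ===== CLAIM (what is proved, stated in full; the proofs are below) =====
def Claim_equal_check_unmapped_keys : Prop := ∀ (mapping : List (String × String)) (full_keys : List String), Dom_check_unmapped_keys mapping full_keys → Spec_check_unmapped_keys mapping full_keys (check_unmapped_keys mapping full_keys)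

-- ===== LEMMAS AND PROOFS =====

-- A's inner flag loop is an 'any' over the values
theorem pv_found_eq (vals : List String) (key : String) (b : Bool) :
    vals.foldl (fun found v => if PySem.Str.isIn key v then true else found) b
      = (b || vals.any (fun v => PySem.Str.isIn key v)) := by
  induction vals generalizing b with
  | nil => simp
  | cons v rest ih =>
    simp only [List.foldl_cons, List.any_cons, ih]
    by_cases h : PySem.Str.isIn key v = true <;> simp [Bool.or_assoc, Bool.or_comm]

-- A's outer append loop is a filter
theorem pv_A_filter (vals : List String) (keys : List String) (acc : List String) :
    keys.foldl (fun unused_keys key =>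
        let found := vals.foldl (fun found v => if PySem.Str.isIn key v then true else found) false
        if !found then unused_keys ++ [key] else unused_keys) acc
      = acc ++ keys.filter (fun k => vals.all (fun v => !(PySem.Str.isIn k v))) := by
  have hp : ∀ key, (!(vals.any fun v => PySem.Str.isIn key v))
      = (vals.all fun v => !(PySem.Str.isIn key v)) := by
    intro key; simp [List.all_eq_not_any_not]
  induction keys generalizing acc with
  | nil => simp
  | cons k rest ih =>
    simp only [List.foldl_cons, List.filter_cons]
    simp only [pv_found_eq, Bool.false_or, hp] at ih ⊢
    by_cases ha : (vals.all fun v => !(PySem.Str.isIn k v)) = true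
    · simp only [ha, if_true]
      rw [ih]
      simp
    · rw [Bool.not_eq_true] at ha
      simp only [ha, Bool.false_eq_true, if_false]
      exact ih acc

-- B's value-major loop filters the remaining set by "no value contains the key"
theorem pv_B_loop (vals : List String) (remaining : List String) (hnd : remaining.Nodup) :
    pvAltLoop vals remaining
      = remaining.filter (fun k => vals.all (fun v => !(PySem.Str.isIn k v))) := by
  induction vals generalizing remaining with
  | nil => simp [pvAltLoop]
  | cons v rest ih =>
    rw [pvAltLoop]
    by_cases he : remaining.isEmpty = true
    · rw [List.isEmpty_iff] at he
      simp [he]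
    · have hnd' : (remaining.filter (fun k => !(PySem.Str.isIn k v))).Nodup :=
        hnd.filter _
      rw [Bool.not_eq_true] at he
      simp only [he, Bool.false_eq_true, if_false]
      rw [PySem.Set.ofList_eq_self_of_nodup _ hnd', ih _ hnd', List.filter_filter]
      apply List.filter_congr
      intro k _
      simp [Bool.and_comm]

theorem check_unmapped_keys_spec : Claim_equal_check_unmapped_keys := by
  intro mapping full_keys _
  unfold Spec_check_unmapped_keys check_unmapped_keys check_unmapped_keys_alt
  rw [pv_A_filter, pv_B_loop _ _ (PySem.Set.nodup_ofList _), List.nil_append]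
  apply List.filter_congr
  intro k hk
  simp only [PySem.Set.contains_eq_listContains]
  simp [List.mem_filter, PySem.Set.mem_ofList, hk, List.all_eq]
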